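-- pv_equiv track=rewrite | github.com/WhaleMoney1/hw8pr5 | hw8pr5.py | partialMatchLocs
-- ===== SOURCE A (Python) =====
-- def partialMatchLocs(word,guess):
--     ''' partialMatchLocs takes in two strings, word and guess, and returns a List containing the indecees where word and guess have the same letter but at different indecees, additionally, if there is more that one location where the guess has more than one partial match in word, it only returns the index for the first index location
--     inputs: word, a string
--             guess, a string
--     returns: a list of indecees (integers)
--     '''
--     wordAsList = list(word)
--     guessAsList = list(guess)
--
--     partialMatches = []
--     for lett in range(len(wordAsList)):
--         if (wordAsList[lett] != guessAsList[lett]) and (guessAsList[lett] in wordAsList): #NOT DONE!!!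
--             partialMatches += [lett]
--             for i in range(len(wordAsList)):
--                 if wordAsList[i] == guess[lett]:
--                     wordAsList[i] = '/0' # acts kinda like a NULL
--                     break
--     return partialMatches
-- ===== SOURCE B (Python) =====
-- def partialMatchLocs(word, guess):
--     # One pass with letter counters instead of mutating a copy of word:
--     # rank[i] = how many earlier occurrences of word[i]; taken[c] = letters c consumed so far.
--     cnt = {}
--     rank = []
--     for ch in word:
--         r = cnt.get(ch, 0)
--         cnt[ch] = r + 1
--         rank.append(r)
--     taken = {}
--     out = []
--     for i in range(len(word)):
--         g = guess[i]
--         t = taken.get(g, 0)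
--         if (word[i] != g or rank[i] < taken.get(word[i], 0)) and t < cnt.get(g, 0):
--             out.append(i)
--             taken[g] = t + 1
--     return out
-- ===== Notes on version B (the rewrite author's own statement) =====
-- stated objective: faster
-- what changed: B replaces A's quadratic scan-and-mutate of a copy of word (a membership scan plus a wipe-first-occurrence scan per position) by a single pass that precomputes per-letter totals and earlier-occurrence ranks and tracks a consumed counter per letter.
import Mathlib
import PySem

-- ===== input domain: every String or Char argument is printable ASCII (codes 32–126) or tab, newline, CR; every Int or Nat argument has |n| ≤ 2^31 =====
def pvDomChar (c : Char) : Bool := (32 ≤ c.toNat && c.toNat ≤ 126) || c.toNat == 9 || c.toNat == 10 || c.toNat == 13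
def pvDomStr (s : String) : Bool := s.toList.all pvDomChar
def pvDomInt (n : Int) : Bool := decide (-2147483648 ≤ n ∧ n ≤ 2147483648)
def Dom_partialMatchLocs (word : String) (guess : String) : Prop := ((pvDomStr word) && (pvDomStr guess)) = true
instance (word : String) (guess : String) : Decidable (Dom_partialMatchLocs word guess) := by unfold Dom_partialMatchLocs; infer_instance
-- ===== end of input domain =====

-- B replaces A's scan-and-mutate of a word copy (inner membership and wipe scans)
-- by a single pass over per-letter counters (objective: faster).

-- ===== PORT A =====
-- list(word) elements are 1-char strings; the '/0' sentinel is a 2-char string.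
def pvStr1 (c : Char) : String := String.ofList [c]

-- the inner "for i … if wordAsList[i]==guess[lett]: wordAsList[i]='/0'; break" loop
def pvWipeFirst : List String → String → List String
  | [], _ => []
  | x :: xs, g => if x = g then "/0" :: xs else x :: pvWipeFirst xs g

def pvStepA (guessAsList : List String) (st : List String × List Int) (lett : Int) :
    List String × List Int :=
  match PySem.List.pyGet? st.1 lett, PySem.List.pyGet? guessAsList lett with
  | some wc, some gc =>
      if wc ≠ gc ∧ gc ∈ st.1 then (pvWipeFirst st.1 gc, st.2 ++ [lett]) else st
  | _, _ => st   -- IndexError (guess shorter than word): excluded by Pre_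

def partialMatchLocs (word : String) (guess : String) : List Int :=
  let wordAsList := word.toList.map pvStr1
  let guessAsList := guess.toList.map pvStr1
  ((PySem.List.pyRange 0 (wordAsList.length : Int) 1).foldl
      (pvStepA guessAsList) (wordAsList, [])).2

-- ===== PORT B =====
-- first loop of Source B: build cnt (letter totals) and rank (earlier-occurrence counts)
def pvPreStep (st : PySem.Dict Char Int × List Int) (ch : Char) :
    PySem.Dict Char Int × List Int :=
  let r := st.1.getD ch 0
  (st.1.insert ch (r + 1), st.2 ++ [r])

def pvStepB (gC wlC : List Char) (cnt : PySem.Dict Char Int) (rank : List Int)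
    (st : PySem.Dict Char Int × List Int) (i : Int) :
    PySem.Dict Char Int × List Int :=
  match PySem.List.pyGet? gC i, PySem.List.pyGet? wlC i, PySem.List.pyGet? rank i with
  | some g, some w, some r =>
      let t := st.1.getD g 0
      if (¬ w = g ∨ r < st.1.getD w 0) ∧ t < cnt.getD g 0 then
        (st.1.insert g (t + 1), st.2 ++ [i])
      else st
  | _, _, _ => st   -- IndexError (guess shorter than word): excluded by Pre_

def partialMatchLocs_alt (word : String) (guess : String) : List Int :=
  let wl := word.toList
  let pre := wl.foldl pvPreStep (PySem.Dict.empty, [])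
  let cnt := pre.1
  let rank := pre.2
  ((PySem.List.pyRange 0 (wl.length : Int) 1).foldl
      (pvStepB guess.toList wl cnt rank) (PySem.Dict.empty, [])).2

-- ===== PRECONDITION & SPEC =====
-- Python A evaluates guess[lett] for every lett < len(word), so it raises IndexError
-- exactly when guess is shorter than word; Pre_ excludes exactly those inputs.
def Pre_partialMatchLocs (word : String) (guess : String) : Prop :=
  word.toList.length ≤ guess.toList.length
instance (word : String) (guess : String) : Decidable (Pre_partialMatchLocs word guess) := by
  unfold Pre_partialMatchLocs; infer_instance

def pvWitness_partialMatchLocs : String × String := ("ab", "ba")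

def Spec_partialMatchLocs (word : String) (guess : String) (out : List Int) : Prop :=
  out = partialMatchLocs_alt word guess
instance (word : String) (guess : String) (out : List Int) :
    Decidable (Spec_partialMatchLocs word guess out) := by
  unfold Spec_partialMatchLocs; infer_instance

-- ===== CLAIM (what is proved, stated in full; the proofs are below) =====
def Claim_equal_partialMatchLocs : Prop :=
  ∀ (word : String) (guess : String), Dom_partialMatchLocs word guess →
    Pre_partialMatchLocs word guess →
    Spec_partialMatchLocs word guess (partialMatchLocs word guess)

-- ===== LEMMAS AND PROOFS =====

theorem pvStr1_ne_null (g : Char) : "/0" ≠ pvStr1 g := by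
  intro h; have := congrArg String.toList h; simp [pvStr1] at this

theorem pvStr1_inj {a b : Char} : pvStr1 a = pvStr1 b ↔ a = b := by
  constructor
  · intro h; have := congrArg String.toList h; simpa [pvStr1] using this
  · intro h; rw [h]

-- pointwise decrement / increment of a letter-count function
def pvDec (f : Char → Nat) (c : Char) : Char → Nat := fun d => if d = c then f d - 1 else f d
def pvInc (f : Char → Nat) (c : Char) : Char → Nat := fun d => if d = c then f d + 1 else f d

theorem pvDec_self (f : Char → Nat) (c : Char) : pvDec f c c = f c - 1 := by simp [pvDec]
theorem pvDec_ne (f : Char → Nat) (c d : Char) (h : d ≠ c) : pvDec f c d = f d := by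
  simp [pvDec, h]
theorem pvInc_self (f : Char → Nat) (c : Char) : pvInc f c c = f c + 1 := by simp [pvInc]
theorem pvInc_ne (f : Char → Nat) (c d : Char) (h : d ≠ c) : pvInc f c d = f d := by
  simp [pvInc, h]

-- Abstract model of A's mutated word copy: position j of `pvRepr cs f` is wiped
-- ('/0') iff fewer than f(cs[j]) occurrences of cs[j] lie strictly before j.
def pvRepr : List Char → (Char → Nat) → List String
  | [], _ => []
  | c :: cs, f => (if f c = 0 then pvStr1 c else "/0") :: pvRepr cs (pvDec f c)

theorem pvRepr_length (cs : List Char) (f : Char → Nat) : (pvRepr cs f).length = cs.length := by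
  induction cs generalizing f with
  | nil => rfl
  | cons c t ih => simp [pvRepr, ih]

theorem pvRepr_zero (cs : List Char) : pvRepr cs (fun _ => 0) = cs.map pvStr1 := by
  induction cs with
  | nil => rfl
  | cons c t ih =>
      have hf : pvDec (fun _ => 0) c = (fun _ : Char => 0) := by
        funext d; by_cases h : d = c <;> simp [pvDec, h]
      simp [pvRepr, hf, ih]

theorem pvHead_eq (c g : Char) (f : Char → Nat) :
    (pvStr1 g = if f c = 0 then pvStr1 c else "/0") ↔ (c = g ∧ f c = 0) := by
  by_cases h0 : f c = 0
  · simp [h0, pvStr1_inj, eq_comm]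
  · simp only [h0, and_false, iff_false, if_false]
    exact fun h => pvStr1_ne_null g h.symm

theorem pvRepr_mem (cs : List Char) (f : Char → Nat) (g : Char) :
    pvStr1 g ∈ pvRepr cs f ↔ f g < cs.count g := by
  induction cs generalizing f with
  | nil => simp [pvRepr]
  | cons c t ih =>
      simp only [pvRepr, List.mem_cons, ih, List.count_cons, pvHead_eq]
      by_cases hcg : c = g
      · subst hcg
        simp only [beq_self_eq_true, if_true, pvDec_self, true_and]
        constructor
        · rintro (h | h) <;> omega
        · intro h
          by_cases h0 : f c = 0
          · exact Or.inl h0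
          · exact Or.inr (by omega)
      · have hbe : (c == g) = false := by simpa using hcg
        rw [pvDec_ne f c g (fun h => hcg h.symm)]
        simp [hbe, hcg]

theorem pvRepr_get (cs : List Char) (f : Char → Nat) (j : Nat) (h : j < cs.length) :
    (pvRepr cs f)[j]'(by rw [pvRepr_length]; exact h) =
      if (cs.take j).count (cs[j]'h) < f (cs[j]'h) then "/0" else pvStr1 (cs[j]'h) := by
  induction cs generalizing f j with
  | nil => simp at h
  | cons c t ih =>
      cases j with
      | zero =>
          simp only [pvRepr, List.getElem_cons_zero, List.take_zero, List.count_nil]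
          by_cases h0 : f c = 0
          · rw [if_pos h0, if_neg (by omega)]
          · rw [if_neg h0, if_pos (by omega)]
      | succ j =>
          have hj : j < t.length := by simpa using h
          simp only [pvRepr, List.getElem_cons_succ, List.take_succ_cons, List.count_cons]
          rw [ih _ j hj]
          by_cases hc : t[j]'hj = c
          · rw [hc, pvDec_self]
            simp only [beq_self_eq_true, if_true]
            congr 1
            simp only [eq_iff_iff]
            omega
          · have hbe : (c == t[j]'hj) = false := by
              simp only [beq_eq_false_iff_ne]; exact fun hh => hc hh.symm
            rw [pvDec_ne f c _ hc]
            simp [hbe]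

theorem pvWipeFirst_repr (cs : List Char) (f : Char → Nat) (g : Char)
    (h : f g < cs.count g) :
    pvWipeFirst (pvRepr cs f) (pvStr1 g) = pvRepr cs (pvInc f g) := by
  induction cs generalizing f with
  | nil => simp [List.count_nil] at h
  | cons c t ih =>
      by_cases hcg : c = g
      · subst hcg
        have h' : f c < t.count c + 1 := by simpa [List.count_cons] using h
        by_cases h0 : f c = 0
        · have e1 : pvDec (pvInc f c) c = pvDec f c := by
            funext d
            by_cases hd : d = c
            · subst hd; simp [pvDec, pvInc, h0]
            · simp [pvDec, pvInc, hd]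
          have lhs : pvWipeFirst (pvRepr (c :: t) f) (pvStr1 c) =
              "/0" :: pvRepr t (pvDec f c) := by
            show pvWipeFirst ((if f c = 0 then pvStr1 c else "/0") :: pvRepr t (pvDec f c))
                (pvStr1 c) = _
            rw [if_pos h0]
            show (if pvStr1 c = pvStr1 c then "/0" :: pvRepr t (pvDec f c)
                else pvStr1 c :: pvWipeFirst (pvRepr t (pvDec f c)) (pvStr1 c)) = _
            rw [if_pos rfl]
          have rhs : pvRepr (c :: t) (pvInc f c) =
              "/0" :: pvRepr t (pvDec (pvInc f c) c) := by
            show (if pvInc f c c = 0 then pvStr1 c else "/0") :: _ = _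
            rw [pvInc_self, if_neg (by omega)]
          rw [lhs, rhs, e1]
        · have e1 : pvDec (pvInc f c) c = pvInc (pvDec f c) c := by
            funext d
            by_cases hd : d = c
            · subst hd
              rw [pvDec_self, pvInc_self, pvInc_self, pvDec_self]
              omega
            · simp [pvDec, pvInc, hd]
          have lhs : pvWipeFirst (pvRepr (c :: t) f) (pvStr1 c) =
              "/0" :: pvWipeFirst (pvRepr t (pvDec f c)) (pvStr1 c) := by
            show pvWipeFirst ((if f c = 0 then pvStr1 c else "/0") :: pvRepr t (pvDec f c))
                (pvStr1 c) = _
            rw [if_neg h0]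
            show (if ("/0" : String) = pvStr1 c then "/0" :: pvRepr t (pvDec f c)
                else "/0" :: pvWipeFirst (pvRepr t (pvDec f c)) (pvStr1 c)) = _
            rw [if_neg (pvStr1_ne_null c)]
          have rhs : pvRepr (c :: t) (pvInc f c) =
              "/0" :: pvRepr t (pvDec (pvInc f c) c) := by
            show (if pvInc f c c = 0 then pvStr1 c else "/0") :: _ = _
            rw [pvInc_self, if_neg (by omega)]
          have hlt : pvDec f c c < t.count c := by rw [pvDec_self]; omega
          rw [lhs, rhs, e1, ih _ hlt]
      · have hlt : f g < t.count g := by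
          have hbe : (c == g) = false := by simpa using hcg
          simpa [List.count_cons, hbe] using h
        have e1 : pvDec (pvInc f g) c = pvInc (pvDec f c) g := by
          funext d
          by_cases hd : d = c
          · subst hd; simp [pvDec, pvInc, hcg]
          · by_cases hdg : d = g
            · have hgc : g ≠ c := hdg ▸ hd
              rw [hdg, pvDec_ne (pvInc f g) c g hgc, pvInc_self, pvInc_self,
                pvDec_ne f c g hgc]
            · rw [pvDec_ne (pvInc f g) c d hd, pvInc_ne f g d hdg, pvInc_ne (pvDec f c) g d hdg,
                pvDec_ne f c d hd]
        have hlt' : pvDec f c g < t.count g := by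
          rw [pvDec_ne f c g (fun hh => hcg hh.symm)]; exact hlt
        have lhs : pvWipeFirst (pvRepr (c :: t) f) (pvStr1 g) =
            (if f c = 0 then pvStr1 c else "/0") ::
              pvWipeFirst (pvRepr t (pvDec f c)) (pvStr1 g) := by
          show pvWipeFirst ((if f c = 0 then pvStr1 c else "/0") :: pvRepr t (pvDec f c))
              (pvStr1 g) = _
          by_cases h0 : f c = 0
          · rw [if_pos h0]
            show (if pvStr1 c = pvStr1 g then "/0" :: pvRepr t (pvDec f c)
                else pvStr1 c :: pvWipeFirst (pvRepr t (pvDec f c)) (pvStr1 g)) = _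
            rw [if_neg (fun hh => hcg (pvStr1_inj.mp hh))]
          · rw [if_neg h0]
            show (if ("/0" : String) = pvStr1 g then "/0" :: pvRepr t (pvDec f c)
                else "/0" :: pvWipeFirst (pvRepr t (pvDec f c)) (pvStr1 g)) = _
            rw [if_neg (pvStr1_ne_null g)]
        have rhs : pvRepr (c :: t) (pvInc f g) =
            (if f c = 0 then pvStr1 c else "/0") :: pvRepr t (pvDec (pvInc f g) c) := by
          show (if pvInc f g c = 0 then pvStr1 c else "/0") :: _ = _
          rw [pvInc_ne f g c hcg]
        rw [lhs, rhs, e1, ih _ hlt']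

-- the rank list produced by Source B's first loop
def pvRankList : List Char → PySem.Dict Char Int → List Int
  | [], _ => []
  | c :: t, d => d.getD c 0 :: pvRankList t (d.insert c (d.getD c 0 + 1))

theorem pvPre_fst (cs : List Char) (d : PySem.Dict Char Int) (acc : List Int) (c : Char) :
    ((cs.foldl pvPreStep (d, acc)).1).getD c 0 = d.getD c 0 + cs.count c := by
  induction cs generalizing d acc with
  | nil => simp
  | cons a t ih =>
      simp only [List.foldl_cons, pvPreStep, List.count_cons]
      rw [ih]
      rw [PySem.Dict.getD_insert]
      by_cases hca : c = a
      · subst hca; simp; omega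
      · have hbe : (a == c) = false := by simpa using (fun h => hca h.symm : ¬ a = c)
        simp [hca, hbe]

theorem pvPre_snd (cs : List Char) (d : PySem.Dict Char Int) (acc : List Int) :
    (cs.foldl pvPreStep (d, acc)).2 = acc ++ pvRankList cs d := by
  induction cs generalizing d acc with
  | nil => simp [pvRankList]
  | cons a t ih =>
      simp only [List.foldl_cons, pvPreStep, pvRankList]
      rw [ih]
      simp

theorem pvRankList_length (cs : List Char) (d : PySem.Dict Char Int) :
    (pvRankList cs d).length = cs.length := by
  induction cs generalizing d with
  | nil => rfl
  | cons a t ih => simp [pvRankList, ih]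

theorem pvRankList_get (cs : List Char) (d : PySem.Dict Char Int) (j : Nat) (h : j < cs.length) :
    (pvRankList cs d)[j]'(by rw [pvRankList_length]; exact h) =
      d.getD (cs[j]'h) 0 + ((cs.take j).count (cs[j]'h) : Int) := by
  induction cs generalizing d j with
  | nil => simp at h
  | cons a t ih =>
      cases j with
      | zero => simp [pvRankList]
      | succ j =>
          have hj : j < t.length := by simpa using h
          simp only [pvRankList, List.getElem_cons_succ, List.take_succ_cons, List.count_cons]
          rw [ih _ j hj, PySem.Dict.getD_insert]
          by_cases hc : t[j]'hj = a
          · rw [if_pos hc, hc]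
            simp
            omega
          · have hbe : (a == t[j]'hj) = false := by
              simp only [beq_eq_false_iff_ne]; exact fun hh => hc hh.symm
            rw [if_neg hc]
            simp [hbe]

-- main coupling: A's fold over the mutated word copy versus B's fold over counters
theorem pvMain (wlC gC : List Char) (cnt : PySem.Dict Char Int) (rank : List Int)
    (hlen : wlC.length ≤ gC.length)
    (hcnt : ∀ c, cnt.getD c 0 = (wlC.count c : Int))
    (hrankLen : rank.length = wlC.length)
    (hrank : ∀ (j : Nat) (h : j < wlC.length),
        rank[j]'(by omega) = ((wlC.take j).count (wlC[j]'h) : Int))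
    (idxs : List Int) (f : Char → Nat) (taken : PySem.Dict Char Int) (acc : List Int)
    (hidx : ∀ i ∈ idxs, 0 ≤ i ∧ i < (wlC.length : Int))
    (htaken : ∀ c, taken.getD c 0 = (f c : Int)) :
    (idxs.foldl (pvStepA (gC.map pvStr1)) (pvRepr wlC f, acc)).2 =
      (idxs.foldl (pvStepB gC wlC cnt rank) (taken, acc)).2 := by
  induction idxs generalizing f taken acc with
  | nil => rfl
  | cons i rest ih =>
      obtain ⟨hi0, hiw⟩ := hidx i (List.mem_cons_self ..)
      obtain ⟨j, rfl⟩ : ∃ j : Nat, i = (j : Int) := ⟨i.toNat, by omega⟩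
      have hj : j < wlC.length := by exact_mod_cast hiw
      have hjg : j < gC.length := by omega
      have hA1 : PySem.List.pyGet? (pvRepr wlC f) (j : Int) =
          some ((pvRepr wlC f)[j]'(by rw [pvRepr_length]; exact hj)) := by
        rw [PySem.List.pyGet?_natCast]
        exact List.getElem?_eq_getElem (by rw [pvRepr_length]; exact hj)
      have hA2 : PySem.List.pyGet? (gC.map pvStr1) (j : Int) = some (pvStr1 (gC[j]'hjg)) := by
        rw [PySem.List.pyGet?_natCast]
        rw [List.getElem?_eq_getElem (by simpa using hjg)]
        simp
      have hB1 : PySem.List.pyGet? gC (j : Int) = some (gC[j]'hjg) := by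
        rw [PySem.List.pyGet?_natCast]
        exact List.getElem?_eq_getElem hjg
      have hB2 : PySem.List.pyGet? wlC (j : Int) = some (wlC[j]'hj) := by
        rw [PySem.List.pyGet?_natCast]
        exact List.getElem?_eq_getElem hj
      have hB3 : PySem.List.pyGet? rank (j : Int) =
          some (((wlC.take j).count (wlC[j]'hj) : Int)) := by
        rw [PySem.List.pyGet?_natCast]
        rw [List.getElem?_eq_getElem (by omega)]
        rw [hrank j hj]
      have hwc := pvRepr_get wlC f j hj
      have hcondA : ((pvRepr wlC f)[j]'(by rw [pvRepr_length]; exact hj) ≠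
              pvStr1 (gC[j]'hjg) ∧ pvStr1 (gC[j]'hjg) ∈ pvRepr wlC f) ↔
          ((¬ (wlC[j]'hj) = (gC[j]'hjg) ∨
              ((wlC.take j).count (wlC[j]'hj) : Int) <
                taken.getD (wlC[j]'hj) 0) ∧
            taken.getD (gC[j]'hjg) 0 < cnt.getD (gC[j]'hjg) 0) := by
        rw [hwc, pvRepr_mem, htaken (wlC[j]'hj), htaken (gC[j]'hjg),
          hcnt (gC[j]'hjg)]
        constructor
        · rintro ⟨h1, h2⟩
          refine ⟨?_, by exact_mod_cast h2⟩
          by_cases hlt : (wlC.take j).count (wlC[j]'hj) < f (wlC[j]'hj)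
          · right; exact_mod_cast hlt
          · left; rw [if_neg hlt] at h1; exact fun hh => h1 (by rw [hh])
        · rintro ⟨h1, h2⟩
          refine ⟨?_, by exact_mod_cast h2⟩
          by_cases hlt : (wlC.take j).count (wlC[j]'hj) < f (wlC[j]'hj)
          · rw [if_pos hlt]; exact Ne.symm (fun hh => pvStr1_ne_null _ hh.symm)
          · rw [if_neg hlt]
            rcases h1 with h1 | h1
            · exact fun hh => h1 (pvStr1_inj.mp hh)
            · exfalso; exact hlt (by exact_mod_cast h1)
      have hrest : ∀ x ∈ rest, 0 ≤ x ∧ x < (wlC.length : Int) :=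
        fun x hx => hidx x (List.mem_cons_of_mem _ hx)
      simp only [List.foldl_cons, pvStepA, pvStepB, hA1, hA2, hB1, hB2, hB3]
      by_cases hcond : ((¬ (wlC[j]'hj) = (gC[j]'hjg) ∨
              ((wlC.take j).count (wlC[j]'hj) : Int) <
                taken.getD (wlC[j]'hj) 0) ∧
            taken.getD (gC[j]'hjg) 0 < cnt.getD (gC[j]'hjg) 0)
      · rw [if_pos (hcondA.mpr hcond), if_pos hcond]
        have hfg : f (gC[j]'hjg) < wlC.count (gC[j]'hjg) := by
          have h2 := hcond.2
          rw [htaken (gC[j]'hjg), hcnt (gC[j]'hjg)] at h2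
          exact_mod_cast h2
        rw [pvWipeFirst_repr wlC f _ hfg]
        refine ih _ _ _ hrest (fun c => ?_)
        rw [PySem.Dict.getD_insert]
        by_cases hc : c = gC[j]'hjg
        · rw [if_pos hc, hc, pvInc_self, htaken (gC[j]'hjg)]
          push_cast
          ring
        · rw [if_neg hc, pvInc_ne f _ c hc, htaken c]
      · rw [if_neg (fun hh => hcond (hcondA.mp hh)), if_neg hcond]
        exact ih _ _ _ hrest htaken

-- ===== VERDICT (by name: the statement is the Claim_ definition above) =====
theorem partialMatchLocs_spec : Claim_equal_partialMatchLocs := by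
  unfold Claim_equal_partialMatchLocs
  intro word guess _ hpre
  unfold Spec_partialMatchLocs partialMatchLocs partialMatchLocs_alt
  simp only
  have hlen : word.toList.length ≤ guess.toList.length := hpre
  have hcnt : ∀ c, ((word.toList.foldl pvPreStep (PySem.Dict.empty, [])).1).getD c 0 =
      (word.toList.count c : Int) := by
    intro c; rw [pvPre_fst]; simp
  have hrk : (word.toList.foldl pvPreStep (PySem.Dict.empty, [])).2 =
      pvRankList word.toList PySem.Dict.empty := by
    rw [pvPre_snd]; simp
  have hrank : ∀ (j : Nat) (h : j < word.toList.length),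
      (pvRankList word.toList PySem.Dict.empty)[j]'(by rw [pvRankList_length]; exact h) =
        ((word.toList.take j).count (word.toList[j]'h) : Int) := by
    intro j h
    rw [pvRankList_get _ _ j h]
    simp
  have hmain := pvMain word.toList guess.toList
      (word.toList.foldl pvPreStep (PySem.Dict.empty, [])).1
      (pvRankList word.toList PySem.Dict.empty)
      hlen hcnt (pvRankList_length _ _)
      hrank
      (PySem.List.pyRange 0 (word.toList.length : Int) 1)
      (fun _ => 0) PySem.Dict.empty []
      (fun i hi => by
        rw [PySem.List.mem_pyRange_one] at hi
        exact ⟨hi.1, hi.2⟩)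
      (fun c => by simp)
  rw [pvRepr_zero] at hmain
  simp only [List.length_map]
  rw [hrk]
  exact hmain
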